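-- pv_equiv track=rewrite | github.com/dnjswoc/algorithm-problem | SWEA/stack1/21618_repeat_string/21618_repeat_string.py | remove_repeat
-- ===== SOURCE A (Python) =====
-- def remove_repeat(seq_str):         # 반복된 문자열 제거하는 함수
--     stack = []                      # 스택 생성
--     for string in seq_str:          # 문자열 순회
--         if string not in stack:     # 스택에 문자열이 없으면
--             stack += [string]       # 스택에 문자열 저장
--         elif string in stack:       # 스택에 문자열이 있으면
--             if string == stack[-1]:  # 문자열이 스택 마지막 문자열과 같으면
--                 stack.pop()         # 스택 리스트 pop
--             else:                   # 문자열이 스택 마지막 문자열과 다르면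
--                 stack += [string]   # 스택에 추가
--     list_count = 0                       # 스택 리스트이 개수
--     for factor in stack:            # 스택 순회
--         list_count += 1                  # count 1씩 증가
--     return list_count                    # count return
-- ===== SOURCE B (Python) =====
-- def remove_repeat(seq_str):
--     items = list(seq_str)
--     while True:
--         out = []
--         i = 0
--         n = len(items)
--         while i < n:
--             if i + 1 < n and items[i] == items[i + 1]:
--                 i += 2          # adjacent equal pair: drop both
--             else:
--                 out.append(items[i])
--                 i += 1
--         if len(out) == len(items):
--             return len(out)
--         items = out
-- ===== Notes on version B (the rewrite author's own statement) =====
-- stated objective: alternative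
-- what changed: Replaces the stack fold (push/pop with a linear membership test per character) by repeated forward passes that each delete adjacent equal pairs, iterated until the length stabilises; the result is the length of the normal form of adjacent-pair cancellation, which equals A's final stack length by confluence.
import Mathlib
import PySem

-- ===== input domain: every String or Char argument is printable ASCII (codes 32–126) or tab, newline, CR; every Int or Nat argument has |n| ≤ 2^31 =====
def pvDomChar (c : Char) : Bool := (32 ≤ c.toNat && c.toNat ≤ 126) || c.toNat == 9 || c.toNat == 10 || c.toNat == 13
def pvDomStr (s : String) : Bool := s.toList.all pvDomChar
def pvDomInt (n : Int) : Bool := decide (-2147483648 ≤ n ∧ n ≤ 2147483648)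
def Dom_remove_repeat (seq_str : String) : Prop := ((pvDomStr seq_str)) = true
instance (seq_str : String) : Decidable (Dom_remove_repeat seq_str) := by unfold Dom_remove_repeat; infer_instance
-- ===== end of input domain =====

-- B replaces A's stack fold by repeated adjacent-equal-pair-deletion passes to a fixpoint
-- (alternative decomposition, same result by confluence of adjacent cancellation).

-- ===== PORT A =====
-- one iteration of A's for-loop: membership test, then compare with stack[-1]
-- (stack[-1] is only consulted when c ∈ stack, so the stack is nonempty there;
--  the `none` value of pyGet? is unreachable and falls into the push branch).
def pvStepA (stack : List Char) (c : Char) : List Char :=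
  if ¬ (c ∈ stack) then stack ++ [c]
  else if c ∈ stack then
    (if PySem.List.pyGet? stack (-1) = some c then stack.dropLast else stack ++ [c])
  else stack

def remove_repeat (seq_str : String) : Int :=
  let stack := seq_str.toList.foldl pvStepA []
  -- counting loop: list_count += 1 for each element of stack
  stack.foldl (fun list_count _ => list_count + 1) (0 : Int)

-- ===== PORT B =====
-- one pass: delete adjacent equal pairs left to right (Source B's inner while over indices,
-- written as the equivalent structural recursion on the item list)
def pvOnePass : List Char → List Char
  | a :: b :: t => if a = b then pvOnePass t else a :: pvOnePass (b :: t)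
  | [a] => [a]
  | [] => []
termination_by l => l.length

theorem pvOnePass_length_le (l : List Char) : (pvOnePass l).length ≤ l.length := by
  fun_induction pvOnePass l with
  | case1 b t ih => simp; omega
  | case2 a b t h ih => simpa using ih
  | case3 a => simp
  | case4 => simp

-- Source B's outer while: repeat passes until the length no longer changes
def pvBLoop (items : List Char) : List Char :=
  let out := pvOnePass items
  if out.length = items.length then items else pvBLoop out
termination_by items.length
decreasing_by
  exact Nat.lt_of_le_of_ne (pvOnePass_length_le items) (by simpa using ‹_›)

def remove_repeat_alt (seq_str : String) : Int :=
  (pvBLoop seq_str.toList).length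

-- ===== PRECONDITION & SPEC =====
def Spec_remove_repeat (seq_str : String) (out : Int) : Prop := out = remove_repeat_alt seq_str
instance (seq_str : String) (out : Int) : Decidable (Spec_remove_repeat seq_str out) := by unfold Spec_remove_repeat; infer_instance

-- ===== CLAIM (what is proved, stated in full; the proofs are below) =====
def Claim_equal_remove_repeat : Prop := ∀ (seq_str : String), Dom_remove_repeat seq_str → Spec_remove_repeat seq_str (remove_repeat seq_str)

-- ===== LEMMAS AND PROOFS =====

-- reversed-stack step (top of stack at the head): the canonical cancellation step
def pvRStep (st : List Char) (c : Char) : List Char :=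
  match st with
  | a :: t => if a = c then t else c :: a :: t
  | [] => [c]

theorem pvStepA_rev (st : List Char) (c : Char) :
    pvStepA st c = (pvRStep st.reverse c).reverse := by
  unfold pvStepA pvRStep
  by_cases hm : c ∈ st
  · simp only [hm, not_true_eq_false, if_false, if_true]
    rw [PySem.List.pyGet?_neg_one]
    rcases h : st.reverse with _ | ⟨a, t⟩
    · simp at h; subst h; simp at hm
    · have hst : st = (a :: t).reverse := by rw [← h]; simp
      subst hst
      have hlast : (t.reverse ++ [a]).getLast? = some a := List.getLast?_concat
      by_cases hac : a = c
      · simp [hac]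
      · simp [hlast, hac]
  · simp only [hm, not_false_eq_true, if_true]
    rcases h : st.reverse with _ | ⟨a, t⟩
    · simp at h; subst h; simp
    · have hst : st = (a :: t).reverse := by rw [← h]; simp
      subst hst
      have hac : a ≠ c := by
        intro e; subst e; exact hm (by simp)
      simp [hac]

theorem foldl_stepA_rev (xs : List Char) (st : List Char) :
    xs.foldl pvStepA st = (xs.foldl pvRStep st.reverse).reverse := by
  induction xs generalizing st with
  | nil => simp
  | cons x t ih => simp [List.foldl_cons, pvStepA_rev, ih]

-- invariant: the stack never holds two adjacent equal elements
theorem pvRStep_chain {st : List Char} (h : st.IsChain (· ≠ ·)) (c : Char) :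
    (pvRStep st c).IsChain (· ≠ ·) := by
  rcases st with _ | ⟨a, t⟩
  · simp [pvRStep]
  · by_cases hac : a = c
    · simpa [pvRStep, hac] using h.tail
    · rw [show pvRStep (a :: t) c = c :: a :: t by simp [pvRStep, hac]]
      refine List.isChain_cons.mpr ⟨?_, h⟩
      intro y hy
      rw [List.head?_cons, Option.mem_some_iff] at hy
      subst hy
      exact Ne.symm hac

-- pushing then cancelling the same element is the identity on chained stacks
theorem pvRStep_twice {st : List Char} (h : st.IsChain (· ≠ ·)) (a : Char) :
    pvRStep (pvRStep st a) a = st := by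
  rcases st with _ | ⟨b, t⟩
  · simp [pvRStep]
  · by_cases hba : b = a
    · subst hba
      rcases t with _ | ⟨c, t'⟩
      · simp [pvRStep]
      · have hbc : b ≠ c := (List.isChain_cons.mp h).1 c rfl
        simp [pvRStep, Ne.symm hbc]
    · simp [pvRStep, hba]

-- a pass of adjacent-pair deletion does not change the cancellation normal form
theorem foldl_rstep_onePass (xs : List Char) :
    ∀ st : List Char, st.IsChain (· ≠ ·) →
      (pvOnePass xs).foldl pvRStep st = xs.foldl pvRStep st := by
  fun_induction pvOnePass xs with
  | case1 b t ih =>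
    intro st hst
    rw [List.foldl_cons, List.foldl_cons, pvRStep_twice hst]
    exact ih st hst
  | case2 a b t h ih =>
    intro st hst
    rw [List.foldl_cons, List.foldl_cons]
    exact ih (pvRStep st a) (pvRStep_chain hst a)
  | case3 a => intro st _; rfl
  | case4 => intro st _; rfl

theorem pvOnePass_len_eq (l : List Char) :
    (pvOnePass l).length = l.length → pvOnePass l = l := by
  fun_induction pvOnePass l with
  | case1 b t ih =>
    intro h
    exfalso
    have := pvOnePass_length_le t
    simp at h; omega
  | case2 a b t heq ih =>
    intro h
    simp only [List.length_cons, Nat.add_right_cancel_iff] at h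
    rw [ih h]
  | case3 a => intro _; rfl
  | case4 => intro _; rfl

-- a list fixed by the pass has no adjacent equal pair
theorem pvOnePass_fix_chain (l : List Char) :
    pvOnePass l = l → l.IsChain (· ≠ ·) := by
  fun_induction pvOnePass l with
  | case1 b t ih =>
    intro h
    exfalso
    have hl := congrArg List.length h
    have := pvOnePass_length_le t
    simp at hl; omega
  | case2 a b t heq ih =>
    intro h
    have ht : pvOnePass (b :: t) = b :: t := by injection h
    refine List.isChain_cons.mpr ⟨?_, ih ht⟩
    intro y hy
    rw [List.head?_cons, Option.mem_some_iff] at hy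
    subst hy
    exact heq
  | case3 a => intro _; simp
  | case4 => intro _; simp

-- on a chained list, the cancellation fold just reverses the list onto the stack
theorem foldl_rstep_of_chain (l : List Char) :
    ∀ st : List Char, l.IsChain (· ≠ ·) →
      (∀ a ∈ st.head?, ∀ b ∈ l.head?, a ≠ b) →
      l.foldl pvRStep st = l.reverse ++ st := by
  induction l with
  | nil => intro st _ _; simp
  | cons c t ih =>
    intro st hch hhd
    have hstep : pvRStep st c = c :: st := by
      rcases st with _ | ⟨a, s⟩
      · rfl
      · have : a ≠ c := hhd a rfl c rfl
        simp [pvRStep, this]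
    rw [List.foldl_cons, hstep, ih (c :: st) hch.tail ?_]
    · simp
    · intro a ha b hb
      simp at ha; subst ha
      rcases t with _ | ⟨d, t'⟩
      · simp at hb
      · simp at hb; subst hb
        exact (List.isChain_cons.mp hch).1 d rfl

-- the fixpoint loop preserves the normal form, and its result is a pass fixpoint
theorem pvBLoop_foldl (xs : List Char) :
    (pvBLoop xs).foldl pvRStep [] = xs.foldl pvRStep []
    ∧ pvOnePass (pvBLoop xs) = pvBLoop xs := by
  fun_induction pvBLoop xs with
  | case1 items out hlen =>
    refine ⟨rfl, ?_⟩
    exact pvOnePass_len_eq items (by simpa [out] using hlen)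
  | case2 items out hlen ih =>
    refine ⟨?_, ih.2⟩
    rw [ih.1]
    exact foldl_rstep_onePass items [] (by simp)

theorem foldl_count (l : List Char) : ∀ n : Int,
    l.foldl (fun list_count _ => list_count + 1) n = n + l.length := by
  induction l with
  | nil => intro n; simp
  | cons a t ih => intro n; simp [List.foldl_cons, ih]; omega

-- ===== VERDICT (by name: the statement is the Claim_ definition above) =====
theorem remove_repeat_spec : Claim_equal_remove_repeat := by
  intro s _
  unfold Spec_remove_repeat remove_repeat remove_repeat_alt
  simp only [foldl_count, foldl_stepA_rev, List.reverse_nil]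
  obtain ⟨h1, h2⟩ := pvBLoop_foldl s.toList
  have hch := pvOnePass_fix_chain _ h2
  have hfix : (pvBLoop s.toList).foldl pvRStep [] = (pvBLoop s.toList).reverse := by
    simpa using foldl_rstep_of_chain (pvBLoop s.toList) [] hch (by simp)
  have : (s.toList.foldl pvRStep []).length = (pvBLoop s.toList).length := by
    rw [← h1, hfix, List.length_reverse]
  simp [this]
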